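-- pv_equiv track=rewrite | github.com/jngsoo/PS | Codility/Time_Complexity/TapeEquilibrium.py | solution_trash
-- ===== SOURCE A (Python) =====
-- def solution_trash(A):
--     if len(A) == 2:
--         return abs(A[0] - A[1])
--     min = abs(sum(A[:1]) - sum(A[1:]))
--     for i in range(2, len(A)):
--         temp_difference = abs(sum(A[:i]) - sum(A[i:]))
--         if temp_difference < min:
--             min = temp_difference
--
--     return min
-- ===== SOURCE B (Python) =====
-- def solution_trash(A):
--     total = sum(A)
--     if len(A) < 2:
--         return abs(total)
--     left = A[0]
--     best = abs(2 * left - total)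
--     for x in A[1:-1]:
--         left += x
--         d = abs(2 * left - total)
--         if d < best:
--             best = d
--     return best
-- ===== Notes on version B (the rewrite author's own statement) =====
-- stated objective: faster
-- what changed: A recomputes sum(A[:i]) and sum(A[i:]) from scratch at every split point (quadratic); B computes the total once and sweeps a running prefix sum, deriving each split difference as |2*left - total| in a single pass.
import Mathlib
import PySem

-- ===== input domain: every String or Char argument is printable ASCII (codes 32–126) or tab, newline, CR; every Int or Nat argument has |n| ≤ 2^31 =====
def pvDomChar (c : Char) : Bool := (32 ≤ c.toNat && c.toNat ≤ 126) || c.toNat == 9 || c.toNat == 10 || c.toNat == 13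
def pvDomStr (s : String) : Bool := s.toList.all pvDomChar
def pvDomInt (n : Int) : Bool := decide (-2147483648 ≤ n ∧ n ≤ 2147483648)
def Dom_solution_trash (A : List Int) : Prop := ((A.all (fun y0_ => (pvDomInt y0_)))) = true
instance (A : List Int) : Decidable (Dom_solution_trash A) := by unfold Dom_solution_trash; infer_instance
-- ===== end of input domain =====

-- B replaces A's quadratic re-summation of both slices at every split point by one total and a
-- running prefix sum (single pass over split points); objective: faster (asymptotic, O(n^2) -> O(n)).


-- ===== PORT A =====
def solution_trash (A : List Int) : Int :=
  if A.length == 2 then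
    |PySem.List.pyGetD A 0 0 - PySem.List.pyGetD A 1 0|
  else
    let min0 : Int := |(PySem.List.slice A none (some 1)).sum - (PySem.List.slice A (some 1) none).sum|
    (PySem.List.pyRange 2 (A.length : Int) 1).foldl
      (fun mn i =>
        let t := |(PySem.List.slice A none (some i)).sum - (PySem.List.slice A (some i) none).sum|
        if t < mn then t else mn) min0

-- ===== PORT B =====
def solution_trash_alt (A : List Int) : Int :=
  let total := A.sum
  if A.length < 2 then |total|
  else
    let left0 := PySem.List.pyGetD A 0 0
    let best0 := |2 * left0 - total|
    ((PySem.List.slice A (some 1) (some (-1))).foldl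
      (fun (s : Int × Int) x =>
        let l := s.1 + x
        let d := |2 * l - total|
        (l, if d < s.2 then d else s.2)) (left0, best0)).2

-- ===== PRECONDITION & SPEC =====
def Spec_solution_trash (A : List Int) (out : Int) : Prop := out = solution_trash_alt A
instance (A : List Int) (out : Int) : Decidable (Spec_solution_trash A out) := by unfold Spec_solution_trash; infer_instance

-- ===== CLAIM (what is proved, stated in full; the proofs are below) =====
def Claim_equal_solution_trash : Prop := ∀ (A : List Int), Dom_solution_trash A → Spec_solution_trash A (solution_trash A)

-- ===== LEMMAS AND PROOFS =====

-- the list of candidate differences B's running-sum loop minimises, starting from partial sum l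
def pvDiffs (T l : Int) : List Int → List Int
  | [] => []
  | x :: xs => |2 * (l + x) - T| :: pvDiffs T (l + x) xs

-- B's pair-state fold computes the if-min fold over pvDiffs
theorem pvFoldB (T : Int) : ∀ (xs : List Int) (l best : Int),
    ((xs.foldl (fun (s : Int × Int) x =>
        let l := s.1 + x
        let d := |2 * l - T|
        (l, if d < s.2 then d else s.2)) (l, best))).2
    = (pvDiffs T l xs).foldl (fun m t => if t < m then t else m) best := by
  intro xs
  induction xs with
  | nil => intro l best; rfl
  | cons x xs ih => intro l best; simp only [List.foldl_cons, pvDiffs]; exact ih (l + x) _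

-- pvDiffs over a window of A, started at the sum of the first j elements, lists the split differences
theorem pvDiffs_take (A : List Int) : ∀ (m j : Nat), j + m ≤ A.length →
    pvDiffs A.sum (A.take j).sum ((A.drop j).take m)
    = (List.range' (j + 1) m).map (fun i => |2 * (A.take i).sum - A.sum|) := by
  intro m
  induction m with
  | zero => intro j _; simp [pvDiffs]
  | succ m ih =>
    intro j hj
    have hjlt : j < A.length := by omega
    rw [List.drop_eq_getElem_cons hjlt, List.take_succ_cons, List.range'_succ, List.map_cons]
    have hsum : (A.take j).sum + A[j] = (A.take (j + 1)).sum := by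
      rw [List.sum_take_succ A j hjlt]
    simp only [pvDiffs, hsum]
    exact congrArg _ (ih (j + 1) (by omega))

-- the two ways of writing a split difference agree
theorem pvSplit (A : List Int) (i : Nat) : (A.take i).sum - (A.drop i).sum = 2 * (A.take i).sum - A.sum := by
  have h : A.sum = (A.take i).sum + (A.drop i).sum := by
    rw [← List.sum_append, List.take_append_drop]
  rw [h]; ring

theorem pvSliceB (xs : List Int) (h : 2 ≤ xs.length) :
    PySem.List.slice xs (some 1) (some (-1)) = (xs.drop 1).take (xs.length - 2) := by
  simp [PySem.List.slice, Nat.min_eq_left (show 1 ≤ xs.length by omega), Nat.sub_sub]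

-- elementwise bridge from A's sliced difference to the prefix-sum form
theorem pvEl (A : List Int) (k : Nat) :
    |(PySem.List.slice A none (some (2 + (k : Int)))).sum - (PySem.List.slice A (some (2 + (k : Int))) none).sum|
    = |2 * (A.take (2 + k)).sum - A.sum| := by
  rw [PySem.List.slice_to A (by omega), PySem.List.slice_from A (by omega)]
  have h : ((2 : Int) + (k : Int)).toNat = 2 + k := by omega
  rw [h, pvSplit]

-- A's index loop is the if-min fold over the mapped difference list
theorem pvMapA (A : List Int) (m0 : Int) :
    (PySem.List.pyRange 2 (A.length : Int) 1).foldl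
      (fun mn i =>
        let t := |(PySem.List.slice A none (some i)).sum - (PySem.List.slice A (some i) none).sum|
        if t < mn then t else mn) m0
    = ((List.range' 2 (A.length - 2)).map (fun i => |2 * (A.take i).sum - A.sum|)).foldl
        (fun mn t => if t < mn then t else mn) m0 := by
  rw [PySem.List.pyRange_one, List.foldl_map, List.range'_eq_map_range, List.map_map,
    List.foldl_map]
  have hm : ((A.length : Int) - 2).toNat = A.length - 2 := by omega
  rw [hm]
  simp only [Function.comp, pvEl]

theorem pvGeneral (A : List Int) (hn : 3 ≤ A.length) : solution_trash A = solution_trash_alt A := by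
  have h0 : 0 < A.length := by omega
  unfold solution_trash solution_trash_alt
  rw [if_neg (show ¬((A.length == 2) = true) by simp; omega),
      if_neg (show ¬(A.length < 2) by omega)]
  rw [pvSliceB A (by omega), pvFoldB, pvMapA]
  have hget : PySem.List.pyGetD A 0 (0 : Int) = (A.take 1).sum := by
    rw [PySem.List.pyGetD_zero, List.sum_take_succ A 0 h0]
    cases A with
    | nil => simp at h0
    | cons a t => simp
  rw [hget, pvDiffs_take A (A.length - 2) 1 (by omega)]
  have hinit : |(PySem.List.slice A none (some 1)).sum - (PySem.List.slice A (some 1) none).sum|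
      = |2 * (A.take 1).sum - A.sum| := by
    rw [PySem.List.slice_to A (by omega), PySem.List.slice_from A (by omega)]
    norm_num
    rw [← List.drop_one, pvSplit]
  rw [hinit]

theorem pvMain (A : List Int) : solution_trash A = solution_trash_alt A := by
  match A with
  | [] => rfl
  | [a] =>
    unfold solution_trash solution_trash_alt
    simp [PySem.List.slice]
  | [a, b] =>
    unfold solution_trash solution_trash_alt
    rw [pvSliceB [a, b] (by simp)]
    have ha : PySem.List.pyGetD [a, b] (0 : Int) (0 : Int) = a := by simp [pysem]
    have hb : PySem.List.pyGetD [a, b] (1 : Int) (0 : Int) = b := by simp [pysem]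
    have hr : (2 : Int) * a - (a + b) = a - b := by ring
    simp [ha, hb, hr]
  | a :: b :: c :: t =>
    exact pvGeneral _ (by simp only [List.length_cons]; omega)

-- ===== VERDICT (by name: the statement is the Claim_ definition above) =====
theorem solution_trash_spec : Claim_equal_solution_trash := by
  intro A _
  unfold Spec_solution_trash
  exact pvMain A
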